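-- pv_equiv track=rewrite | github.com/JayShin04/python | 백준/Bronze/5073. 삼각형과 세 변/삼각형과 세 변.py | twoSide
-- ===== SOURCE A (Python) =====
-- def twoSide(triangle):
--     flag = False
--     for i in range(len(triangle)):
--         for j in range(i+1, len(triangle)):
--             if triangle[i] == triangle[j]:
--                 flag = True
--                 return flag
--     return flag
-- ===== SOURCE B (Python) =====
-- def twoSide(triangle):
--     return len(set(triangle)) != len(triangle)
-- ===== Notes on version B (the rewrite author's own statement) =====
-- stated objective: idiomatic
-- what changed: Replaced the nested index loops comparing all pairs with a single set construction whose size is compared to the list length.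
import Mathlib
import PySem

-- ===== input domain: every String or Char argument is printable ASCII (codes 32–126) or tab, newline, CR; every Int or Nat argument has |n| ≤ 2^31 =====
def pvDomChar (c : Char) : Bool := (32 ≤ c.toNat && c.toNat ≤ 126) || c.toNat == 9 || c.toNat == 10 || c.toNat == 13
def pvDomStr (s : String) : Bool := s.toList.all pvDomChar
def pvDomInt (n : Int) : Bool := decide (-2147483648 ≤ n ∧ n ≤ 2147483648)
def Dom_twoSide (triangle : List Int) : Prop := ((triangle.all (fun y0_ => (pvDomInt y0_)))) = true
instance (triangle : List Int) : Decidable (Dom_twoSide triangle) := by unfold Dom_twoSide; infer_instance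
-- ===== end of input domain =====

-- B replaces A's nested pairwise index loops by an idiomatic duplicate test: len(set(xs)) != len(xs).

-- ===== PORT A =====
-- inner loop: for j in range(i+1, len(triangle)): if triangle[i] == triangle[j]: return True
def twoSideInner (triangle : List Int) (i : Int) : List Int → Bool
  | [] => false
  | j :: js =>
      if PySem.List.pyGet? triangle i = PySem.List.pyGet? triangle j then true
      else twoSideInner triangle i js

-- outer loop: for i in range(len(triangle)): …
def twoSideOuter (triangle : List Int) : List Int → Bool
  | [] => false
  | i :: is' =>
      if twoSideInner triangle i (PySem.List.pyRange (i + 1) (triangle.length : Int) 1) then true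
      else twoSideOuter triangle is'

def twoSide (triangle : List Int) : Bool :=
  twoSideOuter triangle (PySem.List.pyRange 0 (triangle.length : Int) 1)

-- ===== PORT B =====
def twoSide_alt (triangle : List Int) : Bool :=
  decide (PySem.Set.len (PySem.Set.ofList triangle) ≠ (triangle.length : Int))

-- ===== PRECONDITION & SPEC =====
def Spec_twoSide (triangle : List Int) (out : Bool) : Prop := out = twoSide_alt triangle
instance (triangle : List Int) (out : Bool) : Decidable (Spec_twoSide triangle out) := by unfold Spec_twoSide; infer_instance

-- ===== CLAIM (what is proved, stated in full; the proofs are below) =====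
def Claim_equal_twoSide : Prop := ∀ (triangle : List Int), Dom_twoSide triangle → Spec_twoSide triangle (twoSide triangle)

-- ===== LEMMAS AND PROOFS =====

theorem twoSideInner_iff (t : List Int) (i : Int) (js : List Int) :
    twoSideInner t i js = true ↔ ∃ j ∈ js, PySem.List.pyGet? t i = PySem.List.pyGet? t j := by
  induction js with
  | nil => simp [twoSideInner]
  | cons j js ih =>
      simp only [twoSideInner]
      split_ifs with h
      · simp [h]
      · simp [ih, h]

theorem twoSideOuter_iff (t : List Int) (is' : List Int) :
    twoSideOuter t is' = true ↔
      ∃ i ∈ is', twoSideInner t i (PySem.List.pyRange (i + 1) (t.length : Int) 1) = true := by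
  induction is' with
  | nil => simp [twoSideOuter]
  | cons i is' ih =>
      simp only [twoSideOuter]
      split_ifs with h
      · simp [h]
      · simp [ih, h]

theorem twoSide_iff_not_nodup (t : List Int) : twoSide t = true ↔ ¬ t.Nodup := by
  rw [twoSide, twoSideOuter_iff, List.nodup_iff_getElem?_ne_getElem?]
  constructor
  · rintro ⟨i, hi, hin⟩
    rw [twoSideInner_iff] at hin
    obtain ⟨j, hj, hij⟩ := hin
    rw [PySem.List.mem_pyRange_one] at hi hj
    intro h
    have h1 : 0 ≤ i := hi.1
    have h2 : i < j := by omega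
    have h3 : j < (t.length : Int) := hj.2
    have hi' : PySem.List.pyGet? t i = t[i.toNat]? := by
      rw [show i = (i.toNat : Int) by omega, PySem.List.pyGet?_natCast, Int.toNat_natCast]
    have hj' : PySem.List.pyGet? t j = t[j.toNat]? := by
      rw [show j = (j.toNat : Int) by omega, PySem.List.pyGet?_natCast, Int.toNat_natCast]
    exact h i.toNat j.toNat (by omega) (by omega) (by rw [← hi', ← hj']; exact hij)
  · intro h
    by_contra hc
    push Not at hc
    apply h
    intro a b hab hb
    have ha' : (a : Int) ∈ PySem.List.pyRange 0 (t.length : Int) 1 := by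
      rw [PySem.List.mem_pyRange_one]; omega
    intro heq
    have := hc (a : Int) ha'
    simp only [ne_eq, twoSideInner_iff] at this
    apply this
    push Not at this
    refine ⟨(b : Int), ?_, ?_⟩
    · rw [PySem.List.mem_pyRange_one]; omega
    · rw [PySem.List.pyGet?_natCast, PySem.List.pyGet?_natCast]; exact heq

theorem ofList_sublist (t : List Int) : (PySem.Set.ofList t).Sublist t := by
  induction t with
  | nil => simp [PySem.Set.ofList_nil]
  | cons x xs ih =>
      rw [PySem.Set.ofList_cons]
      refine List.Sublist.cons₂ x (List.Sublist.trans ?_ ih)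
      simp [PySem.Set.discard]

theorem alt_iff_not_nodup (t : List Int) : twoSide_alt t = true ↔ ¬ t.Nodup := by
  rw [twoSide_alt]
  simp only [decide_eq_true_eq]
  constructor
  · intro h hnd
    exact h (by simp [PySem.Set.ofList_eq_self_of_nodup t hnd, PySem.Set.len])
  · intro hnd h
    apply hnd
    have : PySem.Set.ofList t = t := by
      apply List.Sublist.eq_of_length (ofList_sublist t)
      simpa [PySem.Set.len] using h
    rw [← this]
    exact PySem.Set.nodup_ofList t
-- ===== VERDICT (by name: the statement is the Claim_ definition above) =====
theorem twoSide_spec : Claim_equal_twoSide := by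
  intro t _
  unfold Spec_twoSide
  by_cases h : t.Nodup
  · have ha : twoSide t = false := by
      rw [← Bool.not_eq_true, twoSide_iff_not_nodup]; exact not_not_intro h
    have hb : twoSide_alt t = false := by
      rw [← Bool.not_eq_true, alt_iff_not_nodup]; exact not_not_intro h
    rw [ha, hb]
  · rw [(twoSide_iff_not_nodup t).mpr h, (alt_iff_not_nodup t).mpr h]
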